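-- pv_equiv track=rewrite | github.com/alexandraback/datacollection | solutions_5631989306621952_0/Python/A13xand3r/solution.py | solve
-- ===== SOURCE A (Python) =====
-- def solve(params):
-- 	word = params[0]
-- 	entry = ''
-- 	for letter in word:
-- 		if(entry == ''):
-- 			entry += letter
-- 		else:
-- 			if(entry[0] <= letter):
-- 				entry = letter + entry
-- 			else:
-- 				entry = entry + letter
-- 	return entry
-- ===== SOURCE B (Python) =====
-- def solve(params):
--     word = params[0]
--     # Stage 1: prefix-maximum array pm[i] = max(word[:i+1]).
--     pm = []
--     for c in word:
--         pm.append(c if not pm or pm[-1] < c else pm[-1])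
--     n = len(word)
--     # Stage 2: a letter starts a new left-to-right maximum iff it is >= the max before it.
--     is_new = [i == 0 or pm[i - 1] <= word[i] for i in range(n)]
--     # Stage 3: new maxima go in front in reverse arrival order, the rest keep arrival order.
--     front = ''.join(word[i] for i in range(n - 1, -1, -1) if is_new[i])
--     back = ''.join(word[i] for i in range(n) if not is_new[i])
--     return front + back
-- ===== Notes on version B (the rewrite author's own statement) =====
-- stated objective: alternative
-- what changed: Instead of rebuilding one growing string with a per-letter prepend/append decision against its first character, B precomputes the prefix-maximum array, classifies each index as a left-to-right maximum by comparing against pm[i-1], and assembles the answer from two index comprehensions (maxima scanned back-to-front, the rest in order) joined once.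
import Mathlib
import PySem

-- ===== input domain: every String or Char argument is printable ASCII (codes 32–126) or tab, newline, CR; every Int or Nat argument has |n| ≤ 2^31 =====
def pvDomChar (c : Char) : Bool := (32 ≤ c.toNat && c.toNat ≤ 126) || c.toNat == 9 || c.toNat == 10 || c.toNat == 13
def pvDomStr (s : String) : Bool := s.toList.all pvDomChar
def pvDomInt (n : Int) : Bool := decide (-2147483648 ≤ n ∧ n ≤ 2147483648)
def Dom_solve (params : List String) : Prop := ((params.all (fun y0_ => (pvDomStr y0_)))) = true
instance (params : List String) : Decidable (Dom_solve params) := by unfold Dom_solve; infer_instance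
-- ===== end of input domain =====

-- B replaces A's per-letter prepend/append rebuilding of one string by three staged passes:
-- a prefix-maximum array, an index classification against it, and two index comprehensions
-- joined once (alternative decomposition, not claimed faster here).

-- ===== PORT A =====
-- A's entry string, ported as a List Char rebuilt per A's branches.
def solveStep (entry : List Char) (letter : Char) : List Char :=
  if entry = [] then entry ++ [letter]
  else if entry.head! ≤ letter then letter :: entry
  else entry ++ [letter]

def solve (params : List String) : String :=
  let word := (PySem.List.pyGet? params 0).getD ""
  String.mk (word.toList.foldl solveStep [])

-- ===== PORT B =====
-- pm.append(c if not pm or pm[-1] < c else pm[-1])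
def pmStep (acc : List Char) (c : Char) : List Char :=
  acc ++ [match acc.getLast? with
          | none => c
          | some m => if m < c then c else m]

def pmOf (cs : List Char) : List Char := cs.foldl pmStep []

-- is_new = [i == 0 or pm[i-1] <= word[i] for i in range(n)]
def isNewOf (cs : List Char) : List Bool :=
  (List.range cs.length).map
    (fun i => i == 0 || decide ((pmOf cs).getD (i - 1) ' ' ≤ cs.getD i ' '))

-- front: indices scanned n-1 .. 0 keeping the new maxima
def frontOf (cs : List Char) : List Char :=
  (((List.range cs.length).reverse.filter (fun i => (isNewOf cs).getD i false)).map
    (fun i => cs.getD i ' '))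

-- back: indices 0 .. n-1 keeping the non-maxima
def backOf (cs : List Char) : List Char :=
  (((List.range cs.length).filter (fun i => !((isNewOf cs).getD i false))).map
    (fun i => cs.getD i ' '))

def solve_alt (params : List String) : String :=
  let word := (PySem.List.pyGet? params 0).getD ""
  String.mk (frontOf word.toList ++ backOf word.toList)

-- ===== PRECONDITION & SPEC =====
-- A (and B) raise IndexError at params[0] on the empty list; Pre_ excludes exactly that.
def Pre_solve (params : List String) : Prop := params ≠ []
instance (params : List String) : Decidable (Pre_solve params) := by unfold Pre_solve; infer_instance
def pvWitness_solve : List String := (["banana"])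

def Spec_solve (params : List String) (out : String) : Prop := out = solve_alt params
instance (params : List String) (out : String) : Decidable (Spec_solve params out) := by unfold Spec_solve; infer_instance

-- ===== CLAIM (what is proved, stated in full; the proofs are below) =====
def Claim_equal_solve : Prop := ∀ (params : List String), Dom_solve params → Pre_solve params → Spec_solve params (solve params)

-- ===== LEMMAS AND PROOFS =====

theorem pm_append (cs : List Char) (c : Char) :
    pmOf (cs ++ [c]) = pmOf cs ++ [match (pmOf cs).getLast? with
                                   | none => c
                                   | some m => if m < c then c else m] := by
  simp [pmOf, pmStep]

theorem pm_length (cs : List Char) : (pmOf cs).length = cs.length := by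
  induction cs using List.reverseRecOn with
  | nil => rfl
  | append_singleton cs c ih => rw [pm_append]; simp [ih]

theorem rangeMap_getD (f : Nat → Bool) {n i : Nat} (h : i < n) :
    (((List.range n).map f).getD i false) = f i := by
  rw [List.getD_eq_getElem?_getD]
  simp [List.getElem?_map, List.getElem?_range h]

-- the per-index predicate behind is_new
def fB (cs : List Char) (i : Nat) : Bool :=
  i == 0 || decide ((pmOf cs).getD (i - 1) ' ' ≤ cs.getD i ' ')

theorem front_eq (cs : List Char) :
    frontOf cs = (((List.range cs.length).reverse.filter (fB cs)).map
      (fun i => cs.getD i ' ')) := by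
  unfold frontOf
  congr 1
  apply List.filter_congr
  intro i hi
  have : i < cs.length := List.mem_range.mp (List.mem_reverse.mp hi)
  exact rangeMap_getD _ this

theorem back_eq (cs : List Char) :
    backOf cs = (((List.range cs.length).filter (fun i => ! fB cs i)).map
      (fun i => cs.getD i ' ')) := by
  unfold backOf
  congr 1
  apply List.filter_congr
  intro i hi
  have : i < cs.length := List.mem_range.mp hi
  exact congrArg (fun b => !b) (rangeMap_getD _ this)

theorem fB_stable (cs : List Char) (c : Char) {i : Nat} (h : i < cs.length) :
    fB (cs ++ [c]) i = fB cs i := by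
  unfold fB
  rw [pm_append]
  have h1 : i - 1 < (pmOf cs).length := by rw [pm_length]; omega
  rw [List.getD_append _ _ _ _ h1, List.getD_append _ _ _ _ h]

theorem fB_last (cs : List Char) (c : Char) {m : Char}
    (hm : (pmOf cs).getLast? = some m) (hne : cs ≠ []) :
    fB (cs ++ [c]) cs.length = decide (m ≤ c) := by
  unfold fB
  have hn : cs.length ≠ 0 := by simpa using hne
  have hlen : (pmOf cs).length = cs.length := pm_length cs
  rw [pm_append, hm]
  have h1 : cs.length - 1 < (pmOf cs).length := by omega
  rw [List.getD_append _ _ _ _ h1]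
  rw [List.getLast?_eq_getElem?, hlen] at hm
  have : (pmOf cs).getD (cs.length - 1) ' ' = m := by
    rw [List.getD_eq_getElem?_getD, hm]; rfl
  rw [this]
  simp [hn]

theorem getD_last (cs : List Char) (c : Char) :
    (cs ++ [c]).getD cs.length ' ' = c := by
  rw [List.getD_eq_getElem?_getD]
  simp

-- main invariant: A's fold equals front ++ back, and its head is the running maximum
theorem main_inv (cs : List Char) :
    cs.foldl solveStep [] = frontOf cs ++ backOf cs ∧
    (cs.foldl solveStep []).head? = (pmOf cs).getLast? := by
  induction cs using List.reverseRecOn with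
  | nil => exact ⟨rfl, rfl⟩
  | append_singleton cs c ih =>
    obtain ⟨hF, hH⟩ := ih
    have hstep : (cs ++ [c]).foldl solveStep [] = solveStep (cs.foldl solveStep []) c := by
      simp
    by_cases hcs : cs = []
    · subst hcs
      refine ⟨?_, ?_⟩ <;>
        simp [solveStep, frontOf, backOf, isNewOf, pmOf, pmStep]
    · -- running max exists
      cases hm : (pmOf cs).getLast? with
      | none =>
        exfalso
        have h0 := pm_length cs
        rw [List.getLast?_eq_none_iff.mp hm] at h0
        exact hcs (List.length_eq_zero_iff.mp h0.symm)
      | some m =>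
        have hFne : cs.foldl solveStep [] ≠ [] := by
          intro h; rw [h, hm] at hH; simp at hH
        have hhead : (cs.foldl solveStep []).head! = m := by
          cases hE : cs.foldl solveStep [] with
          | nil => exact absurd hE hFne
          | cons x xs => rw [hE, hm] at hH; simp at hH; simp [hH]
        have hfiltF : ((List.range cs.length).reverse.filter (fB (cs ++ [c]))).map
              (fun i => (cs ++ [c]).getD i ' ') = frontOf cs := by
          rw [front_eq,
            List.filter_congr (fun i hi => fB_stable cs c (List.mem_range.mp (List.mem_reverse.mp hi)))]
          apply List.map_congr_left
          intro i hi
          have : i < cs.length := List.mem_range.mp (List.mem_reverse.mp (List.mem_filter.mp hi).1)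
          rw [List.getD_append _ _ _ _ this]
        have hfiltB : ((List.range cs.length).filter (fun i => ! fB (cs ++ [c]) i)).map
              (fun i => (cs ++ [c]).getD i ' ') = backOf cs := by
          rw [back_eq,
            List.filter_congr (fun i hi => by rw [fB_stable cs c (List.mem_range.mp hi)])]
          apply List.map_congr_left
          intro i hi
          have : i < cs.length := List.mem_range.mp (List.mem_filter.mp hi).1
          rw [List.getD_append _ _ _ _ this]
        have hflag : fB (cs ++ [c]) cs.length = decide (m ≤ c) := fB_last cs c hm hcs
        have hpm' : (pmOf (cs ++ [c])).getLast? = some (if m < c then c else m) := by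
          rw [pm_append, hm]; simp
        have key1 : frontOf (cs ++ [c]) = (if m ≤ c then [c] else []) ++ frontOf cs := by
          rw [front_eq, show (cs ++ [c]).length = cs.length + 1 from by simp,
              List.range_succ, List.reverse_append, List.reverse_singleton,
              List.singleton_append, List.filter_cons, hflag]
          by_cases hc : m ≤ c
          · rw [if_pos (by simp [hc]), if_pos hc, List.map_cons, getD_last, hfiltF,
                List.singleton_append]
          · rw [if_neg (by simp [hc]), if_neg hc, hfiltF, List.nil_append]
        have key2 : backOf (cs ++ [c]) = backOf cs ++ (if m ≤ c then [] else [c]) := by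
          rw [back_eq, show (cs ++ [c]).length = cs.length + 1 from by simp,
              List.range_succ, List.filter_append]
          by_cases hc : m ≤ c
          · rw [List.map_append, hfiltB, List.filter_singleton, hflag]
            simp [hc]
          · rw [List.map_append, hfiltB, List.filter_singleton, hflag]
            simp [hc]
        by_cases hc : m ≤ c
        · have hA : solveStep (cs.foldl solveStep []) c = c :: cs.foldl solveStep [] := by
            simp [solveStep, hFne, hhead, hc]
          refine ⟨?_, ?_⟩
          · rw [hstep, hA, hF, key1, key2]
            simp [hc]
          · rw [hstep, hA, hpm']
            by_cases h2 : m < c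
            · simp [h2]
            · have : m = c := le_antisymm hc (not_lt.mp h2)
              simp [this]
        · have hA : solveStep (cs.foldl solveStep []) c = cs.foldl solveStep [] ++ [c] := by
            simp [solveStep, hFne, hhead, hc]
          refine ⟨?_, ?_⟩
          · rw [hstep, hA, hF, key1, key2]
            simp [hc]
          · rw [hstep, hA, hpm']
            cases hE : cs.foldl solveStep [] with
            | nil => exact absurd hE hFne
            | cons x xs =>
              rw [hE, hm] at hH; simp at hH
              have hmc : ¬ m < c := fun h => hc (le_of_lt h)
              simp [hH, hmc]

-- ===== VERDICT (by name: the statement is the Claim_ definition above) =====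
theorem solve_spec : Claim_equal_solve := by
  intro params _ _
  unfold Spec_solve solve solve_alt
  exact congrArg String.mk (main_inv _).1
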